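-- pv_equiv track=rewrite | github.com/MCUARM/kLib | auto/other/bq78350/space_sbs.py | getNameName
-- ===== SOURCE A (Python) =====
-- def getNameName(word,i):
-- 	j = getTypeIndex(word,i)
--
-- 	res = ""
-- 	for k in range(i,j):
-- 		if k != i:
-- 			res += " "
-- 		res += word[k]
-- 	return res
--
-- def getTypeIndex(word,i):
-- 	matched=False
-- 	while not matched:
-- 		if word[i][0] == "U":
-- 			matched = True
-- 		if word[i][0] == "I":
-- 			matched = True
-- 		if word[i][0] == "F":
-- 			matched = True
-- 		if word[i][0] == "H":
-- 			matched = True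
-- 		if word[i][0] == "S":
-- 			matched = True
-- 		if not matched:
-- 			i+=1
-- 			continue
-- 		if word[i][1].isdigit():
-- 			return i
-- 		matched = False
-- 		i+=1
-- ===== SOURCE B (Python) =====
-- def getNameName(word, i):
--     res = ""
--     k = i
--     while not (word[k][0] in "UIFHS" and word[k][1].isdigit()):
--         if k != i:
--             res += " "
--         res += word[k]
--         k += 1
--     return res
-- ===== Notes on version B (the rewrite author's own statement) =====
-- stated objective: simpler
-- what changed: Replaced the two-pass decomposition (a separate getTypeIndex flag-driven boundary scan followed by a range(i,j) re-indexing join loop) with a single fused scan that tests the boundary with one short-circuit condition and builds the result string while scanning, eliminating the helper function and the second pass over the words.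
import Mathlib
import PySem

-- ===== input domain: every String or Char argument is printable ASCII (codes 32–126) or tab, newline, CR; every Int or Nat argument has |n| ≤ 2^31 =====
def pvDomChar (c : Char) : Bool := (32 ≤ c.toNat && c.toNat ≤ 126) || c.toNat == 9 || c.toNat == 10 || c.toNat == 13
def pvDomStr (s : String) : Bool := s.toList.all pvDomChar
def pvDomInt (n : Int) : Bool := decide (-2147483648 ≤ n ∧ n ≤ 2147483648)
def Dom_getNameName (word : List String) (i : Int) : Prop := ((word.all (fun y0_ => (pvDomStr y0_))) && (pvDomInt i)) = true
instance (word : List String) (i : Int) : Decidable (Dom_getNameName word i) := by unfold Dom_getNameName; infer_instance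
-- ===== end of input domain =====

-- B fuses A's two passes (the getTypeIndex boundary scan, then a range(i,j) join loop) into one
-- scan that builds the result string while looking for the boundary; same return value on Pre_.

-- ===== PORT A =====
-- needed by both ports' termination proofs (cited in decreasing_by)
theorem pvInRange_of_pyGet?_eq_some {α : Type} {xs : List α} {i : Int} {x : α}
    (h : PySem.List.pyGet? xs i = some x) : -(xs.length : Int) ≤ i ∧ i < xs.length := by
  by_cases hr : PySem.Raise.InRange xs.length i
  · simpa [PySem.Raise.InRange] using hr
  · rw [← PySem.List.pyGet?_eq_none_iff] at hr
    simp [h] at hr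

-- transliteration of A's getTypeIndex: the five matched-setting ifs, then the digit test;
-- at the points where Python raises IndexError (excluded by Pre_) it returns i
def getTypeIndex (word : List String) (i : Int) : Int :=
  match h : PySem.List.pyGet? word i with
  | none => i  -- Python: IndexError (word[i])
  | some s =>
    match PySem.List.pyGet? s.toList 0 with
    | none => i  -- Python: IndexError (word[i][0])
    | some c0 =>
      let matched := false
      let matched := if c0 = 'U' then true else matched
      let matched := if c0 = 'I' then true else matched
      let matched := if c0 = 'F' then true else matched
      let matched := if c0 = 'H' then true else matched
      let matched := if c0 = 'S' then true else matched
      if matched then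
        match PySem.List.pyGet? s.toList 1 with
        | none => i  -- Python: IndexError (word[i][1])
        | some c1 =>
          if PySem.Chars.isdigit c1 then i
          else getTypeIndex word (i + 1)
      else getTypeIndex word (i + 1)
termination_by ((word.length : Int) + 1 - i).toNat
decreasing_by
  all_goals
    have := pvInRange_of_pyGet?_eq_some h
    omega

def getNameName (word : List String) (i : Int) : String :=
  let j := getTypeIndex word i
  let res := (PySem.List.pyRange i j 1).foldl
    (fun res k =>
      let res := if k ≠ i then res ++ [' '] else res
      res ++ (PySem.List.pyGetD word k "").toList) ([] : List Char)
  String.ofList res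

-- ===== PORT B =====
-- transliteration of Source B's single while loop: k scans from i, res accumulates the characters
def getNameNameAltAux (word : List String) (i : Int) (k : Int) (res : List Char) : String :=
  match h : PySem.List.pyGet? word k with
  | none => String.ofList res  -- Python: IndexError (word[k])
  | some s =>
    match PySem.List.pyGet? s.toList 0 with
    | none => String.ofList res  -- Python: IndexError (word[k][0])
    | some c0 =>
      if PySem.Chars.isIn [c0] "UIFHS".toList then
        match PySem.List.pyGet? s.toList 1 with
        | none => String.ofList res  -- Python: IndexError (word[k][1])
        | some c1 =>
          if PySem.Chars.isdigit c1 then String.ofList res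
          else getNameNameAltAux word i (k + 1) ((if k ≠ i then res ++ [' '] else res) ++ s.toList)
      else getNameNameAltAux word i (k + 1) ((if k ≠ i then res ++ [' '] else res) ++ s.toList)
termination_by ((word.length : Int) + 1 - k).toNat
decreasing_by
  all_goals
    have := pvInRange_of_pyGet?_eq_some h
    omega

def getNameName_alt (word : List String) (i : Int) : String :=
  getNameNameAltAux word i i []

-- ===== PRECONDITION & SPEC =====
-- s stops the scan: first char in "UIFHS" and second char a digit
def pvBoundary (s : String) : Bool :=
  match s.toList with
  | c0 :: c1 :: _ => (c0 = 'U' || c0 = 'I' || c0 = 'F' || c0 = 'H' || c0 = 'S') && PySem.Chars.isdigit c1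
  | _ => false

-- the scan passes s without raising: nonempty, and a second char exists when the first matched
def pvSafe (s : String) : Bool :=
  match s.toList with
  | [] => false
  | [c0] => !(c0 = 'U' || c0 = 'I' || c0 = 'F' || c0 = 'H' || c0 = 'S')
  | _ => true

-- Pre_: the scan starting at i (Python indexing, so -len ≤ i) reaches a boundary word at index
-- i+d without an IndexError on the way; these are exactly the inputs where A returns normally.
def Pre_getNameName (word : List String) (i : Int) : Prop :=
  ∃ d : Nat, d ≤ word.length + word.length ∧
    -(word.length : Int) ≤ i ∧ i + d < (word.length : Int) ∧
    (PySem.List.pyGet? word (i + d)).any pvBoundary = true ∧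
    ∀ e : Nat, e < d → (PySem.List.pyGet? word (i + e)).all pvSafe = true

instance (word : List String) (i : Int) : Decidable (Pre_getNameName word i) := by
  unfold Pre_getNameName; infer_instance

def pvWitness_getNameName : List String × Int := (["U1"], 0)

def Spec_getNameName (word : List String) (i : Int) (out : String) : Prop := out = getNameName_alt word i
instance (word : List String) (i : Int) (out : String) : Decidable (Spec_getNameName word i out) := by unfold Spec_getNameName; infer_instance

-- ===== CLAIM (what is proved, stated in full; the proofs are below) =====
def Claim_equal_getNameName : Prop := ∀ (word : List String) (i : Int), Dom_getNameName word i → Pre_getNameName word i → Spec_getNameName word i (getNameName word i)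

-- ===== LEMMAS AND PROOFS =====

-- the hypothesis threaded through the induction (Pre_ at scan position k, bound on d dropped)
def pvScanOk (word : List String) (k : Int) (d : Nat) : Prop :=
  -(word.length : Int) ≤ k ∧ k + d < (word.length : Int) ∧
  (PySem.List.pyGet? word (k + d)).any pvBoundary = true ∧
  ∀ e : Nat, e < d → (PySem.List.pyGet? word (k + e)).all pvSafe = true

theorem pvScanOk_step (word : List String) (k : Int) (d : Nat)
    (h : pvScanOk word k (d + 1)) : pvScanOk word (k + 1) d := by
  obtain ⟨h1, h2, h3, h4⟩ := h
  refine ⟨by omega, by push_cast at h2 ⊢; omega, ?_, ?_⟩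
  · have he : k + 1 + (d : Int) = k + (((d : Nat) + 1 : Nat) : Int) := by push_cast; ring
    rw [he]; exact h3
  · intro e he
    have he' : k + 1 + (e : Int) = k + (((e : Nat) + 1 : Nat) : Int) := by push_cast; ring
    rw [he']; exact h4 (e + 1) (by omega)

theorem pvGet_some (word : List String) (k : Int) (d : Nat) (h : pvScanOk word k d) :
    ∃ s, PySem.List.pyGet? word k = some s := by
  obtain ⟨h1, h2, _, _⟩ := h
  cases hg : PySem.List.pyGet? word k with
  | some s => exact ⟨s, rfl⟩
  | none =>
    rw [PySem.List.pyGet?_eq_none_iff] at hg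
    exact absurd ⟨h1, by omega⟩ hg

-- reduce the named-discriminant match of each port once the word at k is known
theorem getTypeIndex_unfold (word : List String) (k : Int) {s : String}
    (hs : PySem.List.pyGet? word k = some s) :
    getTypeIndex word k =
      (match PySem.List.pyGet? s.toList 0 with
       | none => k
       | some c0 =>
         let matched := false
         let matched := if c0 = 'U' then true else matched
         let matched := if c0 = 'I' then true else matched
         let matched := if c0 = 'F' then true else matched
         let matched := if c0 = 'H' then true else matched
         let matched := if c0 = 'S' then true else matched
         if matched then
           match PySem.List.pyGet? s.toList 1 with
           | none => k
           | some c1 =>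
             if PySem.Chars.isdigit c1 then k
             else getTypeIndex word (k + 1)
         else getTypeIndex word (k + 1)) := by
  rw [getTypeIndex]
  split
  · rename_i heq; rw [hs] at heq; cases heq
  · rename_i s' heq; rw [hs] at heq; cases heq; rfl

theorem getNameNameAltAux_unfold (word : List String) (i k : Int) (res : List Char) {s : String}
    (hs : PySem.List.pyGet? word k = some s) :
    getNameNameAltAux word i k res =
      (match PySem.List.pyGet? s.toList 0 with
       | none => String.ofList res
       | some c0 =>
         if PySem.Chars.isIn [c0] "UIFHS".toList then
           match PySem.List.pyGet? s.toList 1 with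
           | none => String.ofList res
           | some c1 =>
             if PySem.Chars.isdigit c1 then String.ofList res
             else getNameNameAltAux word i (k + 1) ((if k ≠ i then res ++ [' '] else res) ++ s.toList)
         else getNameNameAltAux word i (k + 1) ((if k ≠ i then res ++ [' '] else res) ++ s.toList)) := by
  rw [getNameNameAltAux]
  split
  · rename_i heq; rw [hs] at heq; cases heq
  · rename_i s' heq; rw [hs] at heq; cases heq; rfl

theorem pvIsIn (c : Char) :
    PySem.Chars.isIn [c] "UIFHS".toList = (c = 'U' || c = 'I' || c = 'F' || c = 'H' || c = 'S') := by
  have h : "UIFHS".toList = ['U','I','F','H','S'] := by decide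
  rw [h]
  by_cases hc : c = 'U' ∨ c = 'I' ∨ c = 'F' ∨ c = 'H' ∨ c = 'S'
  · have h1 : PySem.Chars.isIn [c] ['U','I','F','H','S'] = true := by
      rw [PySem.Chars.isIn_iff_infix, List.singleton_infix_iff]; simp; tauto
    rw [h1]; simp; tauto
  · have h1 : PySem.Chars.isIn [c] ['U','I','F','H','S'] = false := by
      rw [← Bool.not_eq_true, PySem.Chars.isIn_iff_infix, List.singleton_infix_iff]; simp; tauto
    rw [h1]; simp; tauto

-- one stopping step: at a boundary word both programs stop (A's helper returns k, B returns res)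
theorem pvStop (word : List String) (i k : Int) (res : List Char) {s : String}
    (hs : PySem.List.pyGet? word k = some s) (hb : pvBoundary s = true) :
    getTypeIndex word k = k ∧ getNameNameAltAux word i k res = String.ofList res := by
  rcases hL : s.toList with _ | ⟨c0, _ | ⟨c1, rest⟩⟩
  · simp [pvBoundary, hL] at hb
  · simp [pvBoundary, hL] at hb
  · simp only [pvBoundary, hL, Bool.and_eq_true] at hb
    obtain ⟨hm, hdig⟩ := hb
    have h1 : PySem.List.pyGet? s.toList 0 = some c0 := by
      rw [hL]; exact PySem.List.pyGet?_zero_cons _ _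
    have h2 : PySem.List.pyGet? s.toList 1 = some c1 := by
      rw [hL]; simp [PySem.List.pyGet?, PySem.List.pyIdx?]
    constructor
    · rw [getTypeIndex_unfold word k hs]
      simp only [h1, h2, hdig]
      have hm' := hm
      simp only [Bool.or_eq_true, decide_eq_true_eq] at hm'
      rcases hm' with ((((h | h) | h) | h) | h) <;> subst h <;> simp [hdig]
    · rw [getNameNameAltAux_unfold word i k res hs]
      simp only [h1, h2, hdig, pvIsIn, hm]
      simp

-- one continuing step: at a safe non-boundary word both programs advance to k+1
theorem pvStep (word : List String) (i k : Int) (res : List Char) {s : String}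
    (hs : PySem.List.pyGet? word k = some s)
    (hsafe : pvSafe s = true) (hb : pvBoundary s = false) :
    getTypeIndex word k = getTypeIndex word (k + 1) ∧
    getNameNameAltAux word i k res =
      getNameNameAltAux word i (k + 1) ((if k ≠ i then res ++ [' '] else res) ++ s.toList) := by
  rcases hL : s.toList with _ | ⟨c0, tl⟩
  · simp [pvSafe, hL] at hsafe
  · have h1 : PySem.List.pyGet? s.toList 0 = some c0 := by
      rw [hL]; exact PySem.List.pyGet?_zero_cons _ _
    by_cases hm : (c0 = 'U' || c0 = 'I' || c0 = 'F' || c0 = 'H' || c0 = 'S') = true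
    · rcases hT : tl with _ | ⟨c1, rest⟩
      · rw [hT] at hL; simp [pvSafe, hL, hm] at hsafe
      · rw [hT] at hL
        have hdig : PySem.Chars.isdigit c1 = false := by
          by_contra hd
          rw [Bool.not_eq_false] at hd
          simp only [pvBoundary, hL] at hb
          simp [hm, hd] at hb
        have h2 : PySem.List.pyGet? s.toList 1 = some c1 := by
          rw [hL]; simp [PySem.List.pyGet?, PySem.List.pyIdx?]
        constructor
        · rw [getTypeIndex_unfold word k hs]
          simp only [h1, h2, hdig]
          have hm' := hm
          simp only [Bool.or_eq_true, decide_eq_true_eq] at hm'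
          rcases hm' with ((((h | h) | h) | h) | h) <;> subst h <;> simp [hdig]
        · rw [getNameNameAltAux_unfold word i k res hs]
          simp only [h1, h2, hdig, pvIsIn, hm]
          simp
          rw [hL]
    · replace hm : (c0 = 'U' || c0 = 'I' || c0 = 'F' || c0 = 'H' || c0 = 'S') = false :=
        by simpa using hm
      constructor
      · rw [getTypeIndex_unfold word k hs]
        simp only [h1]
        have hm' := hm
        simp only [Bool.or_eq_false_iff, decide_eq_false_iff_not] at hm'
        obtain ⟨⟨⟨⟨hU, hI⟩, hF⟩, hH⟩, hS⟩ := hm'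
        simp [hU, hI, hF, hH, hS]
      · rw [getNameNameAltAux_unfold word i k res hs]
        simp only [h1, pvIsIn, hm]
        simp
        rw [hL]

-- the fused single pass of B equals "scan to the boundary, then fold A's join loop over the range"
theorem pvScan (word : List String) (i : Int) (d : Nat) :
    ∀ (k : Int) (res : List Char), pvScanOk word k d →
      k ≤ getTypeIndex word k ∧
      getNameNameAltAux word i k res =
        String.ofList ((PySem.List.pyRange k (getTypeIndex word k) 1).foldl
          (fun res k =>
            let res := if k ≠ i then res ++ [' '] else res
            res ++ (PySem.List.pyGetD word k "").toList) res) := by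
  induction d with
  | zero =>
    intro k res h
    obtain ⟨s, hs⟩ := pvGet_some word k 0 h
    have hb : pvBoundary s = true := by
      obtain ⟨_, _, h3, _⟩ := h
      simpa [hs] using h3
    obtain ⟨hA, hB⟩ := pvStop word i k res hs hb
    rw [hA, hB, PySem.List.pyRange_one_eq_nil le_rfl]
    exact ⟨le_rfl, rfl⟩
  | succ d ih =>
    intro k res h
    obtain ⟨s, hs⟩ := pvGet_some word k (d + 1) h
    cases hb : pvBoundary s with
    | true =>
      obtain ⟨hA, hB⟩ := pvStop word i k res hs hb
      rw [hA, hB, PySem.List.pyRange_one_eq_nil le_rfl]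
      exact ⟨le_rfl, rfl⟩
    | false =>
      have hsafe : pvSafe s = true := by
        obtain ⟨_, _, _, h4⟩ := h
        simpa [hs] using h4 0 (by omega)
      obtain ⟨hA, hB⟩ := pvStep word i k res hs hsafe hb
      obtain ⟨ihge, ihq⟩ := ih (k + 1) ((if k ≠ i then res ++ [' '] else res) ++ s.toList)
        (pvScanOk_step word k d h)
      have hlt : k < getTypeIndex word k := by omega
      constructor
      · omega
      · rw [hB, ihq, hA, ← hA, PySem.List.pyRange_one_cons hlt, List.foldl_cons]
        congr 2
        have : PySem.List.pyGetD word k "" = s := by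
          show (PySem.List.pyGet? word k).getD "" = s
          rw [hs]; rfl
        simp [this]

-- ===== VERDICT (by name: the statement is the Claim_ definition above) =====
theorem getNameName_spec : Claim_equal_getNameName := by
  intro word i _ hpre
  obtain ⟨d, _, h1, h2, h3, h4⟩ := hpre
  obtain ⟨_, hq⟩ := pvScan word i d i [] ⟨h1, h2, h3, h4⟩
  show getNameName word i = getNameName_alt word i
  rw [getNameName, getNameName_alt, hq]
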